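-- pv_equiv track=rewrite | github.com/minsk-hackerspace/Bramnik | software/host/host.py | code_to_str
-- ===== SOURCE A (Python) =====
-- def code_to_str(code):
--     str_code = ''
--     for a in reversed(code):
--         if a >> 4 == 15:
--             break
--
--         str_code += str(a >> 4)
--
--         if a & 0x0f == 15:
--             break
--
--         str_code += str(a & 0x0f)
--
--     return str_code
-- ===== SOURCE B (Python) =====
-- def code_to_str(code):
--     # two-phase: flatten all nibbles (high, low per byte, bytes reversed),
--     # then cut at the first sentinel 15 and render.
--     nibbles = [n for a in reversed(code) for n in (a >> 4, a & 0x0f)]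
--     if 15 in nibbles:
--         nibbles = nibbles[:nibbles.index(15)]
--     return ''.join(str(n) for n in nibbles)
-- ===== Notes on version B (the rewrite author's own statement) =====
-- stated objective: simpler
-- what changed: B first builds the flat nibble stream (high then low nibble per byte over the reversed list), then cuts it at the first sentinel 15 and joins, replacing A's interleaved loop with two separate break checks by a build-then-cut pipeline.
import Mathlib
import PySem

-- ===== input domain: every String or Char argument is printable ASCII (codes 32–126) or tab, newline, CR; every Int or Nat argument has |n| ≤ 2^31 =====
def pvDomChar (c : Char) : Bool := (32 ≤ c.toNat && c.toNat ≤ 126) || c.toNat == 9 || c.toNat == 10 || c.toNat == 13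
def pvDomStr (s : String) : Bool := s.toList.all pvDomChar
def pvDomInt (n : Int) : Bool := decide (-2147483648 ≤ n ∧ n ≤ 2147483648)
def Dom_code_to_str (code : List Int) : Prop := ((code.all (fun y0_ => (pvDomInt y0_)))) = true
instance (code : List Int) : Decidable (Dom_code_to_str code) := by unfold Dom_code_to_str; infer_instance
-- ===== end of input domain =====

-- B replaces A's single loop with interleaved break checks by a build-then-cut
-- pipeline (flatten all nibbles, cut at the first 15, join); same cost, simpler shape.

-- ===== PORT A =====
-- A's loop over reversed(code) with its two inline breaks; the growing str_code
-- is carried as the List Char accumulator (String.ofList at the end), exact via PySem.Int.toChars.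
def codeToStrGo : List Int → List Char → List Char
  | [], acc => acc
  | a :: rest, acc =>
    if a >>> 4 = 15 then acc
    else
      let acc1 := acc ++ PySem.Int.toChars (a >>> 4)
      if PySem.Int.band a 15 = 15 then acc1
      else codeToStrGo rest (acc1 ++ PySem.Int.toChars (PySem.Int.band a 15))

def code_to_str (code : List Int) : String :=
  String.ofList (codeToStrGo code.reverse [])

-- ===== PORT B =====
def code_to_str_alt (code : List Int) : String :=
  let nibbles := code.reverse.flatMap (fun (a : Int) => [a >>> 4, PySem.Int.band a 15])
  let cut :=
    if (15 : Int) ∈ nibbles then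
      match PySem.List.index? nibbles 15 with
      | some i => nibbles.take i
      | none => nibbles
    else nibbles
  PySem.Str.join "" (cut.map PySem.Int.toStr)

-- ===== PRECONDITION & SPEC =====
def Spec_code_to_str (code : List Int) (out : String) : Prop := out = code_to_str_alt code
instance (code : List Int) (out : String) : Decidable (Spec_code_to_str code out) := by unfold Spec_code_to_str; infer_instance

-- ===== CLAIM (what is proved, stated in full; the proofs are below) =====
def Claim_equal_code_to_str : Prop := ∀ (code : List Int), Dom_code_to_str code → Spec_code_to_str code (code_to_str code)

-- ===== LEMMAS AND PROOFS =====

-- ''.join over List Char: joining with the empty separator flattens.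
theorem join_empty_sep (css : List (List Char)) :
    PySem.Chars.join [] css = css.flatten := by
  induction css with
  | nil => simp [PySem.Chars.join_nil]
  | cons p rest ih =>
    cases rest with
    | nil => simp [PySem.Chars.join_singleton]
    | cons q r => rw [PySem.Chars.join_cons_cons]; simp_all

-- B's cut-at-first-15 equals takeWhile (· ≠ 15).
theorem cut_eq_takeWhile (l : List Int) :
    (if (15 : Int) ∈ l then
      match PySem.List.index? l 15 with
      | some i => l.take i
      | none => l
     else l) = l.takeWhile (fun n => n != 15) := by
  induction l with
  | nil => simp
  | cons a t ih =>
    by_cases ha : a = 15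
    · subst ha
      rw [PySem.List.index?_cons_self]
      simp
    · rw [PySem.List.index?_cons_of_ne t ha]
      by_cases hm : (15 : Int) ∈ t
      · have hs : ∃ i, PySem.List.index? t 15 = some i := by
          rcases Option.isSome_iff_exists.mp ((PySem.List.index?_isSome_iff t 15).mpr hm) with ⟨i, hi⟩
          exact ⟨i, hi⟩
        rcases hs with ⟨i, hi⟩
        rw [hi] at ih ⊢
        simp only [List.mem_cons, hm, or_true, if_true] at ih ⊢
        simp [Option.map_some, List.take_succ_cons, ha, ← ih]
      · have hn : PySem.List.index? t 15 = none := (PySem.List.index?_eq_none_iff t 15).mpr hm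
        rw [hn] at ih ⊢
        rw [if_neg hm] at ih
        rw [if_neg (by simp [hm, Ne.symm ha] : ¬ (15:Int) ∈ a :: t)]
        rw [List.takeWhile_cons]
        simp [ha, ← ih]

-- A's loop computes acc ++ rendering of the nibble stream cut at the first 15.
theorem codeToStrGo_eq (l : List Int) (acc : List Char) :
    codeToStrGo l acc =
      acc ++ (((l.flatMap (fun (a : Int) => [a >>> 4, PySem.Int.band a 15])).takeWhile
        (fun n => n != 15)).map PySem.Int.toChars).flatten := by
  induction l generalizing acc with
  | nil => simp [codeToStrGo]
  | cons a rest ih =>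
    by_cases h1 : a >>> 4 = 15
    · simp [codeToStrGo, h1]
    · by_cases h2 : PySem.Int.band a 15 = 15
      · simp [codeToStrGo, h1, h2]
      · simp [codeToStrGo, h1, h2, ih]

-- ===== VERDICT (by name: the statement is the Claim_ definition above) =====
theorem code_to_str_spec : Claim_equal_code_to_str := by
  intro code _
  show code_to_str code = code_to_str_alt code
  have hB : (code_to_str_alt code).toList =
      ((((code.reverse.flatMap (fun (a : Int) => [a >>> 4, PySem.Int.band a 15])).takeWhile
        (fun n => n != 15)).map PySem.Int.toChars)).flatten := by
    simp only [code_to_str_alt]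
    rw [cut_eq_takeWhile]
    simp [PySem.Str.toList_join, join_empty_sep, List.map_map,
      Function.comp_def, PySem.Int.toList_toStr]
  have hA : code_to_str code = String.ofList ((code_to_str_alt code).toList) := by
    rw [hB]
    unfold code_to_str
    rw [codeToStrGo_eq]
    simp
  rw [hA, String.ofList_toList]
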